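-- pv_equiv track=rewrite | github.com/Timx85/RandomCode | 106 Strip out vowels and count the number of replacements.py | strip_vowels
-- ===== SOURCE A (Python) =====
-- text = """
-- The Zen of Python, by Tim Peters
--
-- Beautiful is better than ugly.
-- Explicit is better than implicit.
-- Simple is better than complex.
-- Complex is better than complicated.
-- Flat is better than nested.
-- Sparse is better than dense.
-- Readability counts.
-- Special cases aren't special enough to break the rules.
-- Although practicality beats purity.
-- Errors should never pass silently.
-- Unless explicitly silenced.
-- In the face of ambiguity, refuse the temptation to guess.
-- There should be one-- and preferably only one --obvious way to do it.
-- Although that way may not be obvious at first unless you're Dutch.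
-- Now is better than never.
-- Although never is often better than *right* now.
-- If the implementation is hard to explain, it's a bad idea.
-- If the implementation is easy to explain, it may be a good idea.
-- Namespaces are one honking great idea -- let's do more of those!
-- """
--
-- vowels = 'aeiou'
--
-- def strip_vowels(text=text):
--     """Replace all vowels by *, return newly formed string
--        and number of replacements done"""
--     NumberOfVowels = 0
--     textNew = []
--     chars = list(text)
--
--     for c in chars:
--         if c.lower() in vowels:
--             c = '*'
--             NumberOfVowels += 1
--         textNew.append(c)
--
--     return ''.join(textNew),NumberOfVowels
-- ===== SOURCE B (Python) =====
-- text = """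
-- The Zen of Python, by Tim Peters
--
-- Beautiful is better than ugly.
-- Explicit is better than implicit.
-- Simple is better than complex.
-- Complex is better than complicated.
-- Flat is better than nested.
-- Sparse is better than dense.
-- Readability counts.
-- Special cases aren't special enough to break the rules.
-- Although practicality beats purity.
-- Errors should never pass silently.
-- Unless explicitly silenced.
-- In the face of ambiguity, refuse the temptation to guess.
-- There should be one-- and preferably only one --obvious way to do it.
-- Although that way may not be obvious at first unless you're Dutch.
-- Now is better than never.
-- Although never is often better than *right* now.
-- If the implementation is hard to explain, it's a bad idea.
-- If the implementation is easy to explain, it may be a good idea.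
-- Namespaces are one honking great idea -- let's do more of those!
-- """
--
-- _VOWELS_BOTH = 'aeiouAEIOU'
-- _TABLE = str.maketrans(_VOWELS_BOTH, '*' * len(_VOWELS_BOTH))
--
-- def strip_vowels(text=text):
--     """Replace all vowels by *, return newly formed string
--        and number of replacements done"""
--     return text.translate(_TABLE), sum(text.count(v) for v in _VOWELS_BOTH)
-- ===== Notes on version B (the rewrite author's own statement) =====
-- stated objective: faster
-- what changed: B replaces A's per-character Python loop (lower, membership test, list append, counter) with a precomputed translation table applied in one str.translate library pass plus a count computed as the sum of text.count(v) over the ten vowel characters.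
import Mathlib
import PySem

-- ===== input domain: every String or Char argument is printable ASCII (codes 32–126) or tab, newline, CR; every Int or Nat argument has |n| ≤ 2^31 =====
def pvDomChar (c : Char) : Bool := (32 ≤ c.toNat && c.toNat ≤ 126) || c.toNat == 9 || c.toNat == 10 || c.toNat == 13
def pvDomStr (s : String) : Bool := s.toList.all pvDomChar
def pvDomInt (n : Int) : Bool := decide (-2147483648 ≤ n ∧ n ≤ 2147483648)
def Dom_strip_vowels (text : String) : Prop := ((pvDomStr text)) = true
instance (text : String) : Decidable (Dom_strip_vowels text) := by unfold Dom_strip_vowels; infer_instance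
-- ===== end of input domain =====

-- B replaces A's per-character accumulator loop by a translation-table pass (str.translate)
-- plus ten substring-count scans; a timing run measured B faster by a constant factor.

-- ===== PORT A =====
-- A: loop over the characters, appending '*' (and bumping the counter) when c.lower() is in 'aeiou';
-- ''.join of the collected one-char pieces is String.ofList on the collected chars.
def strip_vowels (text : String) : String × Int :=
  let chars := text.toList
  let st := chars.foldl (fun (st : List Char × Int) c =>
      if PySem.Chars.isIn (PySem.Chars.lower [c]) ['a','e','i','o','u'] = true
      then (st.1 ++ ['*'], st.2 + 1)
      else (st.1 ++ [c], st.2)) ([], 0)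
  (String.ofList st.1, st.2)

-- ===== PORT B =====
-- the translation table maps each of 'aeiouAEIOU' to '*'; translate is a map with a table lookup
def pvVowelsBoth : List Char := ['a','e','i','o','u','A','E','I','O','U']

def strip_vowels_alt (text : String) : String × Int :=
  (String.ofList (text.toList.map (fun c => if c ∈ pvVowelsBoth then '*' else c)),
   (pvVowelsBoth.map (fun v => (PySem.Chars.count text.toList [v] : Int))).sum)

-- ===== PRECONDITION & SPEC =====
def Spec_strip_vowels (text : String) (out : String × Int) : Prop := out = strip_vowels_alt text
instance (text : String) (out : String × Int) : Decidable (Spec_strip_vowels text out) := by unfold Spec_strip_vowels; infer_instance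

-- ===== CLAIM (what is proved, stated in full; the proofs are below) =====
def Claim_equal_strip_vowels : Prop := ∀ (text : String), Dom_strip_vowels text → Spec_strip_vowels text (strip_vowels text)

-- ===== LEMMAS AND PROOFS =====

-- the toNat view of Char facts used below
theorem pv_char_eq_iff (a b : Char) : a = b ↔ a.toNat = b.toNat := by
  rw [Char.ext_iff, ← UInt32.toNat_inj]; rfl

theorem pv_char_le_iff (a b : Char) : a ≤ b ↔ a.toNat ≤ b.toNat := by
  rw [Char.le_def, UInt32.le_iff_toNat_le]; rfl

theorem pv_toNat_ofNat (m : Nat) (h : m < 55296) : (Char.ofNat m).toNat = m := by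
  unfold Char.ofNat
  rw [dif_pos (Or.inl h : Nat.isValidChar m)]
  simp [Char.ofNatAux, Char.toNat]

-- A's per-character test equals B's table membership (for every Char)
theorem pv_pred_iff (c : Char) :
    PySem.Chars.isIn (PySem.Chars.lower [c]) ['a','e','i','o','u'] = true ↔ c ∈ pvVowelsBoth := by
  simp only [pvVowelsBoth, PySem.Chars.lower, List.map, PySem.Chars.isIn_iff_infix,
    List.singleton_infix_iff, PySem.Chars.lowerChar, PySem.Chars.isupper,
    Bool.and_eq_true, decide_eq_true_eq, List.mem_cons, List.not_mem_nil, or_false]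
  by_cases h : 'A' ≤ c ∧ c ≤ 'Z'
  · rw [if_pos h]
    rw [pv_char_le_iff, pv_char_le_iff] at h
    rw [show 'A'.toNat = 65 from rfl, show 'Z'.toNat = 90 from rfl] at h
    simp only [pv_char_eq_iff]
    rw [pv_toNat_ofNat _ (by omega)]
    simp only [show 'a'.toNat = 97 from rfl, show 'e'.toNat = 101 from rfl,
      show 'i'.toNat = 105 from rfl, show 'o'.toNat = 111 from rfl, show 'u'.toNat = 117 from rfl,
      show 'A'.toNat = 65 from rfl, show 'E'.toNat = 69 from rfl, show 'I'.toNat = 73 from rfl,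
      show 'O'.toNat = 79 from rfl, show 'U'.toNat = 85 from rfl]
    omega
  · rw [if_neg h]
    rw [pv_char_le_iff, pv_char_le_iff] at h
    rw [show 'A'.toNat = 65 from rfl, show 'Z'.toNat = 90 from rfl] at h
    simp only [pv_char_eq_iff]
    simp only [show 'a'.toNat = 97 from rfl, show 'e'.toNat = 101 from rfl,
      show 'i'.toNat = 105 from rfl, show 'o'.toNat = 111 from rfl, show 'u'.toNat = 117 from rfl,
      show 'A'.toNat = 65 from rfl, show 'E'.toNat = 69 from rfl, show 'I'.toNat = 73 from rfl,
      show 'O'.toNat = 79 from rfl, show 'U'.toNat = 85 from rfl]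
    omega

-- A's fold is "append the mapped character, count the matches"
theorem pv_fold_eq (l : List Char) (acc : List Char) (n : Int) :
    l.foldl (fun (st : List Char × Int) c =>
        if PySem.Chars.isIn (PySem.Chars.lower [c]) ['a','e','i','o','u'] = true
        then (st.1 ++ ['*'], st.2 + 1)
        else (st.1 ++ [c], st.2)) (acc, n)
      = (acc ++ l.map (fun c => if c ∈ pvVowelsBoth then '*' else c),
         n + (l.countP (fun c => c ∈ pvVowelsBoth) : Int)) := by
  induction l generalizing acc n with
  | nil => simp
  | cons c l ih =>
    simp only [List.foldl_cons, List.map_cons, List.countP_cons]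
    by_cases h : c ∈ pvVowelsBoth
    · rw [if_pos ((pv_pred_iff c).mpr h), ih]
      refine Prod.ext (by simp [h]) ?_
      simp only [h, decide_true, if_pos]
      push_cast
      ring
    · rw [if_neg (fun hh => h ((pv_pred_iff c).mp hh)), ih]
      simp [h]

-- Python's text.count(v) for a single character v is the character count
theorem pv_countGo_singleton (v : Char) (l : List Char) :
    ∀ (fuel acc : Nat), l.length ≤ fuel →
      PySem.Chars.count.go [v] fuel l acc = acc + l.count v := by
  induction l with
  | nil => intro fuel acc _; cases fuel <;> simp [PySem.Chars.count.go]
  | cons c l ih =>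
    intro fuel acc hf
    match fuel with
    | 0 => simp at hf
    | Nat.succ fuel =>
      rw [PySem.Chars.count.go]
      have hd : List.drop ([v].length) (c :: l) = l := by simp
      by_cases h : v = c
      · rw [if_pos (by simp [List.isPrefixOf, h]), hd,
          ih fuel (acc + 1) (by simpa using hf)]
        simp [h]
        omega
      · rw [if_neg (by simp [List.isPrefixOf, h]), ih fuel acc (by simpa using hf)]
        simp [Ne.symm h]

theorem pv_count_singleton (v : Char) (s : List Char) :
    PySem.Chars.count s [v] = s.count v := by
  simp only [PySem.Chars.count, List.isEmpty_cons, Bool.false_eq_true, if_false]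
  simpa using pv_countGo_singleton v s s.length 0 le_rfl

-- indicator sum over a duplicate-free list
theorem pv_sum_ind (c : Char) (V : List Char) (hV : V.Nodup) :
    (V.map (fun v => if c = v then (1:Int) else 0)).sum = if c ∈ V then 1 else 0 := by
  induction V with
  | nil => simp
  | cons v V ih =>
    simp only [List.nodup_cons] at hV
    simp only [List.map_cons, List.sum_cons, ih hV.2, List.mem_cons]
    by_cases h : c = v
    · subst h
      simp [hV.1]
    · simp [h]

-- the ten substring counts sum to A's countP
theorem pv_sum_counts (l : List Char) :
    (pvVowelsBoth.map (fun v => (l.count v : Int))).sum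
      = (l.countP (fun c => c ∈ pvVowelsBoth) : Int) := by
  induction l with
  | nil => simp
  | cons c l ih =>
    simp only [List.count_cons, List.countP_cons]
    have : (pvVowelsBoth.map (fun v => ((l.count v + if c = v then 1 else 0 : Nat) : Int))).sum
        = (pvVowelsBoth.map (fun v => (l.count v : Int))).sum
          + (pvVowelsBoth.map (fun v => if c = v then (1:Int) else 0)).sum := by
      simp only [← List.sum_map_add]
      apply congrArg
      apply List.map_congr_left
      intro v _
      push_cast
      split_ifs <;> simp
    simp only [beq_iff_eq] at *
    rw [this, ih, pv_sum_ind c pvVowelsBoth (by decide)]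
    by_cases h : c ∈ pvVowelsBoth <;> simp [h]

-- ===== VERDICT (by name: the statement is the Claim_ definition above) =====
theorem strip_vowels_spec : Claim_equal_strip_vowels := by
  intro text _
  unfold Spec_strip_vowels strip_vowels strip_vowels_alt
  simp only [pv_fold_eq, List.nil_append, zero_add]
  refine Prod.ext rfl ?_
  simp only []
  rw [← pv_sum_counts]
  apply congrArg
  apply List.map_congr_left
  intro v _
  rw [pv_count_singleton]
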